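-- pv_equiv track=rewrite | github.com/666584/algorithm-practice | 백준/실버/14940.py | bfs
-- ===== SOURCE A (Python) =====
-- from collections import deque
--
-- x_list = [0, -1, 0, 1]
--
-- y_list = [1, 0, -1, 0]
--
-- def bfs(graph, n, m, goal):
--     queue = deque([goal])
--     gx, gy = goal
--     distances = [[-1]*m for _ in range(n)]
--     distances[gx][gy] = 0
--
--     while queue:
--         dx, dy = queue.popleft()
--         for i in range(4):
--             x = dx + x_list[i]
--             y = dy + y_list[i]
--             if (x >= 0 and y >= 0 and x < n
--                 and y < m and distances[x][y] == -1):
--                 if graph[x][y] == "1":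
--                     distances[x][y] = distances[dx][dy] + 1
--                     queue.append((x, y))
--     return distances
-- ===== SOURCE B (Python) =====
-- def bfs(graph, n, m, goal):
--     gx, gy = goal
--     distances = [[-1] * m for _ in range(n)]
--     distances[gx][gy] = 0
--     level = 0
--     frontier = [goal]
--     while frontier:
--         level += 1
--         nxt = []
--         for cx, cy in frontier:
--             for x, y in ((cx, cy + 1), (cx - 1, cy), (cx, cy - 1), (cx + 1, cy)):
--                 if 0 <= x < n and 0 <= y < m and distances[x][y] == -1 and graph[x][y] == "1":
--                     distances[x][y] = level
--                     nxt.append((x, y))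
--         frontier = nxt
--     return distances
-- ===== Notes on version B (the rewrite author's own statement) =====
-- stated objective: alternative
-- what changed: Level-synchronous BFS: per-level frontier lists with a level counter supplying every written distance and precomputed neighbour coordinate pairs, instead of a FIFO deque whose enqueued cells get their distance from a parent-cell array lookup.
-- outside the precondition, e.g. on bfs([['1', '1', '0']], 1, 4, (0, 0)): A returns [[0, 1, -1, -1]], B returns [[0, 1, -1, -1]]
import Mathlib
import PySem

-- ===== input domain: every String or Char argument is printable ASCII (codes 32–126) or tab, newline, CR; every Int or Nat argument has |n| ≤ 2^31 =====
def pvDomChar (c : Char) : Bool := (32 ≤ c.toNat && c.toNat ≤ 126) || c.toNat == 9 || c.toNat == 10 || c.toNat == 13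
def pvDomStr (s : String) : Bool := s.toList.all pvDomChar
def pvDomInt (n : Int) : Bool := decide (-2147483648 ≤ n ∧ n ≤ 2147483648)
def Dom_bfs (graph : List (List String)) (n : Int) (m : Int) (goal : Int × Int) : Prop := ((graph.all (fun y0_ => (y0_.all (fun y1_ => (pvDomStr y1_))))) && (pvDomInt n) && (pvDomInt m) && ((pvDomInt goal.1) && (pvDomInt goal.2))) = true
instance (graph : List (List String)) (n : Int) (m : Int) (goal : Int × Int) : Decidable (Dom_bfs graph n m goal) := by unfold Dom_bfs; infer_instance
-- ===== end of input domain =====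

-- B replaces A's FIFO-deque BFS (each cell's distance read back from its parent
-- cell in the array) by a level-synchronous BFS: per-level frontier lists, a level
-- counter supplying the written distances, and precomputed neighbour coordinate
-- pairs; same returned array. (A mutates no argument; only `distances`, which it
-- returns, is built.)

-- ===== PORT A =====
-- Python list index semantics for the two places A can see a negative index (the
-- initial `distances[gx][gy] = 0` and the read-back at a popped cell): a negative
-- index counts from the end.  Out-of-range indexing is excluded by Pre_.
def pyIx (L : Nat) (i : Int) : Nat := (if i < 0 then (L : Int) + i else i).toNat

def xList : List Int := [0, -1, 0, 1]
def yList : List Int := [1, 0, -1, 0]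

-- distances[x][y]  (−2 = "out of range", never a stored distance)
def read2 (D : List (List Int)) (x y : Int) : Int :=
  (D.getD (pyIx D.length x) []).getD (pyIx (D.getD (pyIx D.length x) []).length y) (-2)

-- distances[x][y] = v
def write2 (D : List (List Int)) (x y v : Int) : List (List Int) :=
  D.set (pyIx D.length x)
    ((D.getD (pyIx D.length x) []).set (pyIx (D.getD (pyIx D.length x) []).length y) v)

-- number of cells still holding -1 (termination measure only)
def countNeg (D : List (List Int)) : Nat :=
  (D.map (fun r => r.countP (fun w => w == (-1 : Int)))).sum

-- small abstract arithmetic steps (named so the big grid terms are never quoted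
-- inside an omega certificate)
theorem arith_cons_step (x y w : Nat) (h : x + 1 = y) : x + w + 1 = y + w := by omega
theorem arith_set_zero (a r s : Nat) : r + s + a = a + s + r := by omega
theorem arith_set_succ (x s1 s2 g r : Nat) (h : s1 + g = s2 + r) :
    x + s1 + g = x + s2 + r := by omega
theorem arith_write (a b c d : Nat) (hs : a + b = c + d) (hf : d + 1 = b) :
    a + 1 = c := by omega
theorem arith_fold (a b c w l : Nat) (h1 : w + 1 = c) (h2 : a + b = w + (l + 1)) :
    a + b = c + l := by omega
theorem arith_dec (a b c q : Nat) (h : a + b = c) : 2 * a + (q + b) < 2 * c + (q + 1) := by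
  omega

-- one neighbour: the body of A's `for i in range(4)`
def nbr (graph : List (List String)) (n m dx dy v : Int)
    (st : List (List Int) × List (Int × Int)) (d : Int × Int) :
    List (List Int) × List (Int × Int) :=
  let x := dx + d.1
  let y := dy + d.2
  if x ≥ 0 ∧ y ≥ 0 ∧ x < n ∧ y < m ∧ read2 st.1 x y = -1 then
    if (graph.getD x.toNat []).getD y.toNat "" = "1" then
      (write2 st.1 x y v, st.2 ++ [(x, y)])
    else st
  else st

-- expand one cell: updated distances and the newly discovered cells, in direction order
def expand (graph : List (List String)) (n m : Int) (c : Int × Int) (v : Int)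
    (D : List (List Int)) : List (List Int) × List (Int × Int) :=
  (xList.zip yList).foldl (nbr graph n m c.1 c.2 v) (D, [])

theorem read2_oob_row (D : List (List Int)) (x y : Int)
    (h : D.length ≤ pyIx D.length x) : read2 D x y = -2 := by
  simp [read2, List.getD_eq_getElem?_getD, List.getElem?_eq_none h]

theorem read2_oob_col (D : List (List Int)) (x y : Int)
    (h : (D.getD (pyIx D.length x) []).length
        ≤ pyIx (D.getD (pyIx D.length x) []).length y) : read2 D x y = -2 := by
  simp only [read2, List.getD_eq_getElem?_getD] at h ⊢
  simp [List.getElem?_eq_none h]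

-- Nat-level index analysis behind read2/write2
theorem getset_cases (D : List (List Int)) (i j A B : Nat) (v : Int) :
    ((D.set i ((D.getD i []).set j v)).getD A []).getD B (-2)
        = (D.getD A []).getD B (-2) ∨
      ((D.getD A []).getD B (-2) = (D.getD i []).getD j (-2) ∧
        ((D.set i ((D.getD i []).set j v)).getD A []).getD B (-2) = v) := by
  by_cases hiA : i = A
  · subst hiA
    by_cases hir : i < D.length
    · have hrow : (D.set i ((D.getD i []).set j v)).getD i [] = (D.getD i []).set j v := by
        simp [List.getD_eq_getElem?_getD, hir]
      rw [hrow]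
      by_cases hjB : j = B
      · subst hjB
        by_cases hjr : j < (D.getD i []).length
        · right
          refine ⟨rfl, ?_⟩
          have hjr' : j < (D[i]?.getD []).length := by
            simpa [List.getD_eq_getElem?_getD] using hjr
          simp [List.getD_eq_getElem?_getD, hjr']
        · left
          rw [List.set_eq_of_length_le (Nat.not_lt.mp hjr)]
      · left
        simp [List.getD_eq_getElem?_getD, List.getElem?_set, hjB]
    · left
      rw [List.set_eq_of_length_le (Nat.not_lt.mp hir)]
  · left
    simp [List.getD_eq_getElem?_getD, List.getElem?_set, hiA]

-- the outer length and the length of any row are unchanged by write2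
theorem len_write2 (D : List (List Int)) (x y v : Int) :
    (write2 D x y v).length = D.length := by
  simp [write2]

theorem rowlen_write2 (D : List (List Int)) (x y v : Int) (A : Nat) :
    ((write2 D x y v).getD A []).length = (D.getD A []).length := by
  by_cases hir : pyIx D.length x < D.length
  · by_cases hiA : pyIx D.length x = A
    · subst hiA
      have : (write2 D x y v).getD (pyIx D.length x) []
          = (D.getD (pyIx D.length x) []).set
              (pyIx (D.getD (pyIx D.length x) []).length y) v := by
        simp [write2, List.getD_eq_getElem?_getD, hir]
      rw [this, List.length_set]
    · simp [write2, List.getD_eq_getElem?_getD, List.getElem?_set, hiA]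
  · rw [write2, List.set_eq_of_length_le (Nat.not_lt.mp hir)]

theorem read2_write2 (D : List (List Int)) (x y v a b : Int) :
    read2 (write2 D x y v) a b = read2 D a b ∨
      (read2 D a b = read2 D x y ∧ read2 (write2 D x y v) a b = v) := by
  have h1 : pyIx (write2 D x y v).length a = pyIx D.length a := by rw [len_write2]
  have h2 : pyIx ((write2 D x y v).getD (pyIx D.length a) []).length b
      = pyIx ((D.getD (pyIx D.length a) [])).length b := by rw [rowlen_write2]
  rw [show read2 (write2 D x y v) a b
      = ((write2 D x y v).getD (pyIx D.length a) []).getD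
          (pyIx (D.getD (pyIx D.length a) []).length b) (-2) by
    rw [read2, h1, h2]]
  simpa [read2, write2] using
    getset_cases D (pyIx D.length x) (pyIx (D.getD (pyIx D.length x) []).length y)
      (pyIx D.length a) (pyIx (D.getD (pyIx D.length a) []).length b) v

theorem read2_write2_self (D : List (List Int)) (x y v : Int)
    (h : read2 D x y = -1) : read2 (write2 D x y v) x y = v := by
  have hxr : pyIx D.length x < D.length := by
    by_contra hc
    rw [read2_oob_row D x y (Nat.not_lt.mp hc)] at h; omega
  have hyr : pyIx (D.getD (pyIx D.length x) []).length y
      < (D.getD (pyIx D.length x) []).length := by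
    by_contra hc
    rw [read2_oob_col D x y (Nat.not_lt.mp hc)] at h; omega
  have h1 : pyIx (write2 D x y v).length x = pyIx D.length x := by rw [len_write2]
  have h2 : pyIx ((write2 D x y v).getD (pyIx D.length x) []).length y
      = pyIx ((D.getD (pyIx D.length x) [])).length y := by rw [rowlen_write2]
  rw [show read2 (write2 D x y v) x y
      = ((write2 D x y v).getD (pyIx D.length x) []).getD
          (pyIx (D.getD (pyIx D.length x) []).length y) (-2) by
    rw [read2, h1, h2]]
  have hrow : (write2 D x y v).getD (pyIx D.length x) []
      = (D.getD (pyIx D.length x) []).set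
          (pyIx (D.getD (pyIx D.length x) []).length y) v := by
    simp [write2, List.getD_eq_getElem?_getD, hxr]
  rw [hrow]
  simp only [List.getD_eq_getElem?_getD] at hyr ⊢
  simp [List.getElem?_set, hyr]

theorem countP_set_flip (r : List Int) (j : Nat) (v : Int)
    (hj : j < r.length) (hr : r.getD j (-2) = -1) (hv : v ≠ -1) :
    (r.set j v).countP (fun w => w == (-1 : Int)) + 1
      = r.countP (fun w => w == (-1 : Int)) := by
  induction r generalizing j with
  | nil => simp at hj
  | cons a r ih =>
    cases j with
    | zero =>
      simp [List.getD_eq_getElem?_getD] at hr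
      subst hr
      simp [List.countP_cons, hv]
    | succ j =>
      simp at hj
      simp [List.getD_eq_getElem?_getD] at hr
      have := ih j hj (by simp [List.getD_eq_getElem?_getD, hr])
      rw [List.set_cons_succ, List.countP_cons, List.countP_cons]
      exact arith_cons_step _ _ _ this

theorem countNeg_cons (r : List Int) (D : List (List Int)) :
    countNeg (r :: D) = r.countP (fun w => w == (-1 : Int)) + countNeg D := by
  simp [countNeg]

theorem countNeg_set (D : List (List Int)) (i : Nat) (r' : List Int) (hi : i < D.length) :
    countNeg (D.set i r') + (D.getD i []).countP (fun w => w == (-1 : Int))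
      = countNeg D + r'.countP (fun w => w == (-1 : Int)) := by
  induction D generalizing i with
  | nil => simp at hi
  | cons a D ih =>
    cases i with
    | zero =>
      rw [List.set_cons_zero, List.getD_cons_zero, countNeg_cons, countNeg_cons]
      exact arith_set_zero _ _ _
    | succ i =>
      simp at hi
      rw [List.set_cons_succ, List.getD_cons_succ, countNeg_cons, countNeg_cons]
      exact arith_set_succ _ _ _ _ _ (ih i hi)

theorem countNeg_write2 (D : List (List Int)) (x y v : Int)
    (h : read2 D x y = -1) (hv : v ≠ -1) :
    countNeg (write2 D x y v) + 1 = countNeg D := by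
  have hxr : pyIx D.length x < D.length := by
    by_contra hc
    rw [read2_oob_row D x y (Nat.not_lt.mp hc)] at h; omega
  have hyr : pyIx (D.getD (pyIx D.length x) []).length y
      < (D.getD (pyIx D.length x) []).length := by
    by_contra hc
    rw [read2_oob_col D x y (Nat.not_lt.mp hc)] at h; omega
  have hs := countNeg_set D (pyIx D.length x)
    ((D.getD (pyIx D.length x) []).set (pyIx (D.getD (pyIx D.length x) []).length y) v) hxr
  have hf := countP_set_flip (D.getD (pyIx D.length x) [])
    (pyIx (D.getD (pyIx D.length x) []).length y) v hyr h hv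
  unfold write2
  exact arith_write _ _ _ _ hs hf

-- fold invariant for A's neighbour scan: the measure equation, preservation of
-- already-set cells, and "every collected cell now reads v"
theorem foldNbr_inv (graph : List (List String)) (n m dx dy v : Int) (hv : 0 ≤ v) :
    ∀ (ds : List (Int × Int)) (D : List (List Int)) (acc : List (Int × Int)),
    (∀ p ∈ acc, read2 D p.1 p.2 = v) →
    countNeg (ds.foldl (nbr graph n m dx dy v) (D, acc)).1
        + (ds.foldl (nbr graph n m dx dy v) (D, acc)).2.length
      = countNeg D + acc.length
    ∧ (∀ a b : Int, read2 D a b ≠ -1 →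
        read2 (ds.foldl (nbr graph n m dx dy v) (D, acc)).1 a b = read2 D a b)
    ∧ (∀ p ∈ (ds.foldl (nbr graph n m dx dy v) (D, acc)).2,
        read2 (ds.foldl (nbr graph n m dx dy v) (D, acc)).1 p.1 p.2 = v) := by
  intro ds
  induction ds with
  | nil =>
    intro D acc hacc
    exact ⟨rfl, fun a b _ => rfl, hacc⟩
  | cons d ds ih =>
    intro D acc hacc
    rw [List.foldl_cons]
    by_cases h1 : dx + d.1 ≥ 0 ∧ dy + d.2 ≥ 0 ∧ dx + d.1 < n ∧ dy + d.2 < m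
        ∧ read2 D (dx + d.1) (dy + d.2) = -1
    · by_cases h2 : (graph[(dx + d.1).toNat]?.getD [])[(dy + d.2).toNat]?.getD "" = "1"
      · have hstep : nbr graph n m dx dy v (D, acc) d
            = (write2 D (dx + d.1) (dy + d.2) v, acc ++ [(dx + d.1, dy + d.2)]) := by
          simp [nbr, h1, h2]
        rw [hstep]
        have hread : read2 D (dx + d.1) (dy + d.2) = -1 := h1.2.2.2.2
        have hpres : ∀ a b : Int, read2 D a b ≠ -1 →
            read2 (write2 D (dx + d.1) (dy + d.2) v) a b = read2 D a b := by
          intro a b hab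
          rcases read2_write2 D (dx + d.1) (dy + d.2) v a b with h1' | h2'
          · exact h1'
          · exact absurd (h2'.1.trans hread) hab
        have hacc' : ∀ p ∈ acc ++ [(dx + d.1, dy + d.2)],
            read2 (write2 D (dx + d.1) (dy + d.2) v) p.1 p.2 = v := by
          intro p hp
          rcases List.mem_append.mp hp with hp | hp
          · rw [hpres p.1 p.2 (by rw [hacc p hp]; omega)]; exact hacc p hp
          · simp at hp
            subst hp
            exact read2_write2_self _ _ _ _ hread
        obtain ⟨ihc, ihp, ihv⟩ := ih (write2 D (dx + d.1) (dy + d.2) v)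
          (acc ++ [(dx + d.1, dy + d.2)]) hacc'
        refine ⟨?_, ?_, ihv⟩
        · have hw := countNeg_write2 D (dx + d.1) (dy + d.2) v hread (by omega)
          exact arith_fold _ _ _ _ _ hw (by simpa using ihc)
        · intro a b hab
          rw [ihp a b (by rw [hpres a b hab]; exact hab), hpres a b hab]
      · have hstep : nbr graph n m dx dy v (D, acc) d = (D, acc) := by
          simp [nbr, h1, h2]
        rw [hstep]
        exact ih D acc hacc
    · have hstep : nbr graph n m dx dy v (D, acc) d = (D, acc) := by
        simp [nbr, h1]
      rw [hstep]
      exact ih D acc hacc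

theorem expand_inv (graph : List (List String)) (n m : Int) (c : Int × Int) (v : Int)
    (hv : 0 ≤ v) (D : List (List Int)) :
    countNeg (expand graph n m c v D).1 + (expand graph n m c v D).2.length = countNeg D
    ∧ (∀ a b : Int, read2 D a b ≠ -1 →
        read2 (expand graph n m c v D).1 a b = read2 D a b)
    ∧ (∀ p ∈ (expand graph n m c v D).2,
        read2 (expand graph n m c v D).1 p.1 p.2 = v) := by
  have := foldNbr_inv graph n m c.1 c.2 v hv (xList.zip yList) D [] (by simp)
  simpa [expand] using this

-- invariant propagation and measure decrease for A's loop (named so the proof terms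
-- stay outside the definition body)
theorem aloop_wf_h (graph : List (List String)) (n m : Int) (D : List (List Int))
    (c : Int × Int) (Q' : List (Int × Int)) (h : ∀ x ∈ c :: Q', 0 ≤ read2 D x.1 x.2) :
    ∀ x ∈ Q' ++ (expand graph n m c (read2 D c.1 c.2 + 1) D).2,
      0 ≤ read2 (expand graph n m c (read2 D c.1 c.2 + 1) D).1 x.1 x.2 := by
  intro c' hc'
  have hv : (0 : Int) ≤ read2 D c.1 c.2 + 1 := by
    have := h c (by simp); omega
  obtain ⟨-, hp, hn⟩ := expand_inv graph n m c (read2 D c.1 c.2 + 1) hv D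
  rcases List.mem_append.mp hc' with hm | hm
  · have h0 := h c' (by simp [hm])
    rw [hp c'.1 c'.2 (by omega)]
    exact h0
  · rw [hn c' hm]; omega

theorem aloop_wf_dec (graph : List (List String)) (n m : Int) (D : List (List Int))
    (c : Int × Int) (Q' : List (Int × Int)) (h : ∀ x ∈ c :: Q', 0 ≤ read2 D x.1 x.2) :
    2 * countNeg (expand graph n m c (read2 D c.1 c.2 + 1) D).1
        + (Q' ++ (expand graph n m c (read2 D c.1 c.2 + 1) D).2).length
      < 2 * countNeg D + (c :: Q').length := by
  have hv : (0 : Int) ≤ read2 D c.1 c.2 + 1 := by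
    have := h c (by simp); omega
  obtain ⟨hc, -, -⟩ := expand_inv graph n m c (read2 D c.1 c.2 + 1) hv D
  rw [List.length_append, List.length_cons]
  exact arith_dec _ _ _ _ hc

-- A's while loop: pop from the front, expand with value distances[dx][dy] + 1,
-- append the discovered cells to the queue.  `h` (every queued cell is already set,
-- to a value ≥ 0) is the invariant that makes the loop terminate; it is erased code.
def aloop (graph : List (List String)) (n m : Int) (D : List (List Int))
    (Q : List (Int × Int)) (h : ∀ c ∈ Q, 0 ≤ read2 D c.1 c.2) : List (List Int) :=
  match Q with
  | [] => D
  | c :: Q' =>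
    aloop graph n m (expand graph n m c (read2 D c.1 c.2 + 1) D).1
      (Q' ++ (expand graph n m c (read2 D c.1 c.2 + 1) D).2)
      (aloop_wf_h graph n m D c Q' h)
termination_by 2 * countNeg D + Q.length
decreasing_by exact aloop_wf_dec graph n m D c Q' h

def bfs (graph : List (List String)) (n : Int) (m : Int) (goal : Int × Int) : List (List Int) :=
  let D0 := write2 (List.replicate n.toNat (List.replicate m.toNat (-1))) goal.1 goal.2 0
  -- totality guard: true on every input Pre_bfs admits (goal in wrap range ⇒ its cell reads 0)
  if h : ∀ c ∈ [goal], 0 ≤ read2 D0 c.1 c.2 then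
    aloop graph n m D0 [goal] h
  else D0

-- ===== PORT B =====
-- B's per-cell data: the four neighbour coordinate pairs, written out as Source B writes
-- them
def nbrsOf (c : Int × Int) : List (Int × Int) :=
  [(c.1, c.2 + 1), (c.1 - 1, c.2), (c.1, c.2 - 1), (c.1 + 1, c.2)]

-- distances[x][y] for the 0 ≤ x, 0 ≤ y reads of B's guard (out of range = -2)
def lookCell (D : List (List Int)) (x y : Int) : Int :=
  ((D[x.toNat]?.getD [])[y.toNat]?).getD (-2)

-- distances[x][y] = v for the in-range writes of B's loop
def putCell (D : List (List Int)) (x y v : Int) : List (List Int) :=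
  D.modify x.toNat (fun row => row.set y.toNat v)

-- B's single combined guard and update (Source B's inner `if`)
def bstep (graph : List (List String)) (n m lvl : Int)
    (st : List (List Int) × List (Int × Int)) (p : Int × Int) :
    List (List Int) × List (Int × Int) :=
  if 0 ≤ p.1 ∧ p.1 < n ∧ 0 ≤ p.2 ∧ p.2 < m ∧ lookCell st.1 p.1 p.2 = -1
      ∧ (graph.getD p.1.toNat []).getD p.2.toNat "" = "1" then
    (putCell st.1 p.1 p.2 lvl, st.2 ++ [p])
  else st

-- one whole level of Source B: `for cx, cy in frontier: for x, y in …`, collecting nxt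
def stepLevel (graph : List (List String)) (n m lvl : Int) (D : List (List Int))
    (F : List (Int × Int)) : List (List Int) × List (Int × Int) :=
  F.foldl (fun st c => (nbrsOf c).foldl (bstep graph n m lvl) st) (D, [])

-- B's termination measure: how many -1 cells remain
def countFree (D : List (List Int)) : Nat := D.flatten.count (-1)

theorem countFree_cons (r : List Int) (D : List (List Int)) :
    countFree (r :: D) = r.count (-1) + countFree D := by
  simp [countFree, List.count_append]

theorem count_set_flip (r : List Int) (j : Nat) (v : Int)
    (hj : r[j]? = some (-1)) (hv : v ≠ -1) :
    (r.set j v).count (-1) + 1 = r.count (-1) := by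
  induction r generalizing j with
  | nil => simp at hj
  | cons a r ih =>
    cases j with
    | zero =>
      simp at hj
      subst hj
      simp [List.count_cons, hv]
    | succ j =>
      simp at hj
      rw [List.set_cons_succ, List.count_cons, List.count_cons]
      have := ih j hj
      omega

theorem countFree_set (D : List (List Int)) (i : Nat) (r' : List Int)
    (hi : i < D.length) :
    countFree (D.set i r') + (D[i]?.getD []).count (-1)
      = countFree D + r'.count (-1) := by
  induction D generalizing i with
  | nil => simp at hi
  | cons a D ih =>
    cases i with
    | zero =>
      rw [List.set_cons_zero, countFree_cons, countFree_cons]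
      simp
      omega
    | succ i =>
      simp at hi
      rw [List.set_cons_succ, countFree_cons, countFree_cons]
      have := ih i hi
      simp at this ⊢
      omega

theorem countFree_put (D : List (List Int)) (x y v : Int)
    (hfree : lookCell D x y = -1) (hv : v ≠ -1) :
    countFree (putCell D x y v) + 1 = countFree D := by
  have hx : x.toNat < D.length := by
    by_contra hc
    have : D[x.toNat]? = none := List.getElem?_eq_none (Nat.not_lt.mp hc)
    simp [lookCell, this] at hfree
  have hcell : (D[x.toNat]?.getD [])[y.toNat]? = some (-1) := by
    rcases hco : (D[x.toNat]?.getD [])[y.toNat]? with - | w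
    · simp [lookCell, hco] at hfree
    · simp [lookCell, hco] at hfree
      rw [hfree]
  have hmod : putCell D x y v
      = D.set x.toNat ((D[x.toNat]?.getD []).set y.toNat v) := by
    rw [putCell, List.modify_eq_set_get _ hx]
    simp [List.getElem?_eq_getElem hx, List.get_eq_getElem]
  rw [hmod]
  have hs := countFree_set D x.toNat ((D[x.toNat]?.getD []).set y.toNat v) hx
  have hf := count_set_flip (D[x.toNat]?.getD []) y.toNat v hcell hv
  omega

theorem bfold_cnt (graph : List (List String)) (n m lvl : Int) (hl : lvl ≠ -1) :
    ∀ (ps : List (Int × Int)) (D : List (List Int)) (acc : List (Int × Int)),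
    countFree (ps.foldl (bstep graph n m lvl) (D, acc)).1
        + (ps.foldl (bstep graph n m lvl) (D, acc)).2.length
      = countFree D + acc.length := by
  intro ps
  induction ps with
  | nil => intro D acc; rfl
  | cons p ps ih =>
    intro D acc
    rw [List.foldl_cons]
    by_cases hg : 0 ≤ p.1 ∧ p.1 < n ∧ 0 ≤ p.2 ∧ p.2 < m ∧ lookCell D p.1 p.2 = -1
        ∧ (graph[p.1.toNat]?.getD [])[p.2.toNat]?.getD "" = "1"
    · have hstep : bstep graph n m lvl (D, acc) p
          = (putCell D p.1 p.2 lvl, acc ++ [p]) := by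
        simp [bstep, hg]
      rw [hstep]
      have := ih (putCell D p.1 p.2 lvl) (acc ++ [p])
      have hput := countFree_put D p.1 p.2 lvl hg.2.2.2.2.1 hl
      simp only [List.length_append, List.length_cons, List.length_nil] at this
      omega
    · have hstep : bstep graph n m lvl (D, acc) p = (D, acc) := by
        simp [bstep, hg]
      rw [hstep]
      exact ih D acc
  
theorem blevel_cnt (graph : List (List String)) (n m lvl : Int) (hl : lvl ≠ -1) :
    ∀ (F : List (Int × Int)) (D : List (List Int)) (acc : List (Int × Int)),
    countFree (F.foldl (fun st c => (nbrsOf c).foldl (bstep graph n m lvl) st) (D, acc)).1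
        + (F.foldl (fun st c => (nbrsOf c).foldl (bstep graph n m lvl) st) (D, acc)).2.length
      = countFree D + acc.length := by
  intro F
  induction F with
  | nil => intro D acc; rfl
  | cons c F ih =>
    intro D acc
    rw [List.foldl_cons]
    have h1 := bfold_cnt graph n m lvl hl (nbrsOf c) D acc
    have h2 := ih ((nbrsOf c).foldl (bstep graph n m lvl) (D, acc)).1
      ((nbrsOf c).foldl (bstep graph n m lvl) (D, acc)).2
    simp only [Prod.mk.eta] at h2
    omega

theorem levelSucc (d : Int) (hd : 0 ≤ d) : 0 ≤ d + 1 := by omega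

theorem blvl_wf_dec (graph : List (List String)) (n m : Int) (D : List (List Int))
    (F : List (Int × Int)) (level : Int) (hd : 0 ≤ level) (hF : ¬ F = []) :
    2 * countFree (stepLevel graph n m (level + 1) D F).1
        + (if (stepLevel graph n m (level + 1) D F).2 = [] then 0 else 1)
      < 2 * countFree D + (if F = [] then 0 else 1) := by
  have hcnt := blevel_cnt graph n m (level + 1) (by omega) F D []
  rw [if_neg hF]
  by_cases h0 : (stepLevel graph n m (level + 1) D F).2 = []
  · rw [if_pos h0]
    have : (stepLevel graph n m (level + 1) D F).2.length = 0 := by rw [h0]; rfl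
    simp only [stepLevel, List.length_nil] at hcnt this ⊢
    omega
  · rw [if_neg h0]
    have hpos : 0 < (stepLevel graph n m (level + 1) D F).2.length :=
      List.length_pos_iff.mpr h0
    simp only [stepLevel, List.length_nil] at hcnt hpos ⊢
    omega

-- B's while loop: one recursion step per level, the counter supplying the distances
def blvl (graph : List (List String)) (n m : Int) (D : List (List Int))
    (F : List (Int × Int)) (level : Int) (hd : 0 ≤ level) : List (List Int) :=
  if hF : F = [] then D
  else
    blvl graph n m (stepLevel graph n m (level + 1) D F).1
      (stepLevel graph n m (level + 1) D F).2 (level + 1) (levelSucc level hd)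
termination_by 2 * countFree D + (if F = [] then 0 else 1)
decreasing_by exact blvl_wf_dec graph n m D F level hd hF

-- Source B's first two lines: the -1 grid with the goal cell set to 0 (Python's
-- negative-index wrap written out; exact whenever 0 ≤ n, which Pre_ guarantees)
def initGrid (n m gx gy : Int) : List (List Int) :=
  (List.replicate n.toNat (List.replicate m.toNat (-1))).modify
    (if gx < 0 then n + gx else gx).toNat
    (fun row => row.set (if gy < 0 then m + gy else gy).toNat 0)

def bfs_alt (graph : List (List String)) (n : Int) (m : Int) (goal : Int × Int) : List (List Int) :=
  blvl graph n m (initGrid n m goal.1 goal.2) [goal] 0 (le_refl 0)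

-- ===== PRECONDITION & SPEC =====
-- Pre_ = the goal index pair valid for Python's (negative-wrapping) indexing into the
-- n×m array, and the graph reads guaranteed safe: either the graph covers the whole
-- n×m grid, or every in-range unvisited neighbour of the goal is present in the graph
-- and is not "1" (so the search stops there).  Outside this A raises IndexError on a
-- goal index out of wrap range or on a missing graph cell the search reaches; Pre_
-- also excludes some inputs on which A happens to return because the search dies out
-- before the first missing graph cell — whether A returns there depends on
-- reachability, which no closed form over the input captures.
def Pre_bfs (graph : List (List String)) (n : Int) (m : Int) (goal : Int × Int) : Prop :=
  0 < n ∧ 0 < m ∧ -n ≤ goal.1 ∧ goal.1 < n ∧ -m ≤ goal.2 ∧ goal.2 < m ∧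
  ((n ≤ (graph.length : Int) ∧ ∀ row ∈ graph.take n.toNat, m ≤ (row.length : Int)) ∨
    (∀ p ∈ [(goal.1, goal.2 + 1), (goal.1 - 1, goal.2), (goal.1, goal.2 - 1),
        (goal.1 + 1, goal.2)],
      (0 ≤ p.1 ∧ p.1 < n ∧ 0 ≤ p.2 ∧ p.2 < m ∧
        ¬(p.1 = (if goal.1 < 0 then n + goal.1 else goal.1)
          ∧ p.2 = (if goal.2 < 0 then m + goal.2 else goal.2))) →
      (p.1 < (graph.length : Int) ∧ p.2 < ((graph.getD p.1.toNat []).length : Int)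
        ∧ (graph.getD p.1.toNat []).getD p.2.toNat "" ≠ "1")))
instance (graph : List (List String)) (n : Int) (m : Int) (goal : Int × Int) : Decidable (Pre_bfs graph n m goal) := by unfold Pre_bfs; infer_instance

def pvWitness_bfs : List (List String) × Int × Int × (Int × Int) :=
  ([["1", "1"], ["1", "0"]], 2, 2, (0, 0))

def Spec_bfs (graph : List (List String)) (n : Int) (m : Int) (goal : Int × Int) (out : List (List Int)) : Prop := out = bfs_alt graph n m goal
instance (graph : List (List String)) (n : Int) (m : Int) (goal : Int × Int) (out : List (List Int)) : Decidable (Spec_bfs graph n m goal out) := by unfold Spec_bfs; infer_instance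

-- ===== CLAIM (what is proved, stated in full; the proofs are below) =====
def Claim_equal_bfs : Prop := ∀ (graph : List (List String)) (n : Int) (m : Int) (goal : Int × Int), Dom_bfs graph n m goal → Pre_bfs graph n m goal → Spec_bfs graph n m goal (bfs graph n m goal)

-- ===== LEMMAS AND PROOFS =====

-- ---------- layer 1: A's queue loop equals a level-synchronous loop (proof-only) ----------
theorem arith_expall (a1 a2 l1 l2 c : Nat) (h1 : a1 + l1 = c) (h2 : a2 + l2 = a1) :
    a2 + (l1 + l2) = c := by omega
theorem arith_wf_nil (a c : Nat) (h : a + 0 = c) : 2 * a + 0 < 2 * c + 1 := by omega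
theorem arith_wf_cons (a l c : Nat) (h : a + l = c) (hl : 0 < l) :
    2 * a + 1 < 2 * c + 1 := by omega

def expandAll (graph : List (List String)) (n m v : Int) (D : List (List Int))
    (F : List (Int × Int)) : List (List Int) × List (Int × Int) :=
  match F with
  | [] => (D, [])
  | c :: F' =>
    let r := expand graph n m c v D
    let r2 := expandAll graph n m v r.1 F'
    (r2.1, r.2 ++ r2.2)

theorem expandAll_count (graph : List (List String)) (n m v : Int) (hv : 0 ≤ v) :
    ∀ (F : List (Int × Int)) (D : List (List Int)),
    countNeg (expandAll graph n m v D F).1 + (expandAll graph n m v D F).2.length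
      = countNeg D := by
  intro F
  induction F with
  | nil => intro D; simp [expandAll]
  | cons c F' ih =>
    intro D
    obtain ⟨hc, -, -⟩ := expand_inv graph n m c v hv D
    show countNeg (expandAll graph n m v (expand graph n m c v D).1 F').1
        + ((expand graph n m c v D).2 ++ (expandAll graph n m v (expand graph n m c v D).1 F').2).length = countNeg D
    rw [List.length_append]
    exact arith_expall _ _ _ _ _ hc (ih (expand graph n m c v D).1)

theorem nonneg_succ (d : Int) (hd : 0 ≤ d) : 0 ≤ d + 1 := by omega

theorem bloop_wf_dec (graph : List (List String)) (n m : Int) (D : List (List Int))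
    (F : List (Int × Int)) (dist : Int) (hd : 0 ≤ dist) (hF : ¬ F = []) :
    2 * countNeg (expandAll graph n m (dist + 1) D F).1
        + (if (expandAll graph n m (dist + 1) D F).2 = [] then 0 else 1)
      < 2 * countNeg D + (if F = [] then 0 else 1) := by
  have hc := expandAll_count graph n m (dist + 1) (nonneg_succ dist hd) F D
  rw [if_neg hF]
  by_cases h0 : (expandAll graph n m (dist + 1) D F).2 = []
  · rw [if_pos h0]
    rw [h0] at hc
    exact arith_wf_nil _ _ hc
  · rw [if_neg h0]
    exact arith_wf_cons _ _ _ hc (List.length_pos_iff.mpr h0)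

def bloop (graph : List (List String)) (n m : Int) (D : List (List Int))
    (F : List (Int × Int)) (dist : Int) (hd : 0 ≤ dist) : List (List Int) :=
  if hF : F = [] then D
  else
    bloop graph n m (expandAll graph n m (dist + 1) D F).1
      (expandAll graph n m (dist + 1) D F).2 (dist + 1) (nonneg_succ dist hd)
termination_by 2 * countNeg D + (if F = [] then 0 else 1)
decreasing_by exact bloop_wf_dec graph n m D F dist hd hF

theorem aloop_congr (graph : List (List String)) (n m : Int)
    {D₁ D₂ : List (List Int)} {Q₁ Q₂ : List (Int × Int)}
    (hD : D₁ = D₂) (hQ : Q₁ = Q₂) (h₁ : ∀ c ∈ Q₁, 0 ≤ read2 D₁ c.1 c.2)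
    (h₂ : ∀ c ∈ Q₂, 0 ≤ read2 D₂ c.1 c.2) :
    aloop graph n m D₁ Q₁ h₁ = aloop graph n m D₂ Q₂ h₂ := by
  subst hD; subst hQ; rfl

theorem aloop_nil (graph : List (List String)) (n m : Int) (D : List (List Int))
    (h : ∀ c ∈ ([] : List (Int × Int)), 0 ≤ read2 D c.1 c.2) :
    aloop graph n m D [] h = D := by
  rw [aloop.eq_def]

theorem aloop_cons (graph : List (List String)) (n m : Int) (D : List (List Int))
    (c : Int × Int) (Q' : List (Int × Int))
    (h : ∀ x ∈ c :: Q', 0 ≤ read2 D x.1 x.2)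
    (h₂ : ∀ x ∈ Q' ++ (expand graph n m c (read2 D c.1 c.2 + 1) D).2,
      0 ≤ read2 (expand graph n m c (read2 D c.1 c.2 + 1) D).1 x.1 x.2) :
    aloop graph n m D (c :: Q') h
      = aloop graph n m (expand graph n m c (read2 D c.1 c.2 + 1) D).1
          (Q' ++ (expand graph n m c (read2 D c.1 c.2 + 1) D).2) h₂ := by
  rw [aloop.eq_def]

theorem bloop_nil (graph : List (List String)) (n m : Int) (D : List (List Int))
    (dist : Int) (hd : 0 ≤ dist) :
    bloop graph n m D [] dist hd = D := by
  rw [bloop.eq_def]; simp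

theorem bloop_cons (graph : List (List String)) (n m : Int) (D : List (List Int))
    (F : List (Int × Int)) (dist : Int) (hd : 0 ≤ dist) (hF : F ≠ [])
    (hd₂ : 0 ≤ dist + 1) :
    bloop graph n m D F dist hd
      = bloop graph n m (expandAll graph n m (dist + 1) D F).1
          (expandAll graph n m (dist + 1) D F).2 (dist + 1) hd₂ := by
  rw [bloop.eq_def]; simp [hF]

theorem expandAll_inv (graph : List (List String)) (n m v : Int) (hv : 0 ≤ v) :
    ∀ (F : List (Int × Int)) (D : List (List Int)),
    (∀ a b : Int, read2 D a b ≠ -1 →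
        read2 (expandAll graph n m v D F).1 a b = read2 D a b)
    ∧ (∀ p ∈ (expandAll graph n m v D F).2,
        read2 (expandAll graph n m v D F).1 p.1 p.2 = v) := by
  intro F
  induction F with
  | nil => intro D; exact ⟨fun a b _ => rfl, by simp [expandAll]⟩
  | cons c F' ih =>
    intro D
    obtain ⟨-, hp, hn⟩ := expand_inv graph n m c v hv D
    obtain ⟨ihp, ihn⟩ := ih (expand graph n m c v D).1
    constructor
    · intro a b hab
      show read2 (expandAll graph n m v (expand graph n m c v D).1 F').1 a b = _
      rw [ihp a b (by rw [hp a b hab]; exact hab), hp a b hab]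
    · intro p hp'
      simp only [expandAll, List.mem_append] at hp' ⊢
      rcases hp' with hp' | hp'
      · show read2 (expandAll graph n m v (expand graph n m c v D).1 F').1 p.1 p.2 = v
        rw [ihp p.1 p.2 (by rw [hn p hp']; omega), hn p hp']
      · exact ihn p hp'

theorem aloop_split (graph : List (List String)) (n m : Int) :
    ∀ (F Q : List (Int × Int)) (D : List (List Int)) (d : Int), 0 ≤ d →
    (∀ c ∈ F, read2 D c.1 c.2 = d) →
    ∀ (h : ∀ c ∈ F ++ Q, 0 ≤ read2 D c.1 c.2)
      (h' : ∀ c ∈ Q ++ (expandAll graph n m (d + 1) D F).2,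
        0 ≤ read2 (expandAll graph n m (d + 1) D F).1 c.1 c.2),
    aloop graph n m D (F ++ Q) h
      = aloop graph n m (expandAll graph n m (d + 1) D F).1
          (Q ++ (expandAll graph n m (d + 1) D F).2) h' := by
  intro F
  induction F with
  | nil =>
    intro Q D d hd hF h h'
    exact aloop_congr graph n m rfl (by simp [expandAll]) h h'
  | cons c F' ih =>
    intro Q D d hd hF h h'
    have hcd : read2 D c.1 c.2 = d := hF c (by simp)
    have hv : (0 : Int) ≤ d + 1 := by omega
    have he : expand graph n m c (read2 D c.1 c.2 + 1) D = expand graph n m c (d + 1) D := by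
      rw [hcd]
    obtain ⟨-, hp, hn⟩ := expand_inv graph n m c (d + 1) hv D
    have hF' : ∀ c' ∈ F', read2 (expand graph n m c (d + 1) D).1 c'.1 c'.2 = d := by
      intro c' hc'
      rw [hp c'.1 c'.2 (by rw [hF c' (by simp [hc'])]; omega)]
      exact hF c' (by simp [hc'])
    have hmid : ∀ c' ∈ F' ++ (Q ++ (expand graph n m c (d + 1) D).2),
        0 ≤ read2 (expand graph n m c (d + 1) D).1 c'.1 c'.2 := by
      intro c' hc'
      rcases List.mem_append.mp hc' with hm | hm
      · rw [hF' c' hm]; omega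
      · rcases List.mem_append.mp hm with hm2 | hm2
        · have h0 := h c' (by simp [hm2])
          rw [hp c'.1 c'.2 (by omega)]; exact h0
        · rw [hn c' hm2]; omega
    have hmid2 : ∀ c' ∈ (F' ++ Q) ++ (expand graph n m c (d + 1) D).2,
        0 ≤ read2 (expand graph n m c (d + 1) D).1 c'.1 c'.2 := by
      intro c' hc'
      exact hmid c' (by simpa [List.append_assoc] using hc')
    have hmid2' : ∀ c' ∈ (F' ++ Q) ++ (expand graph n m c (read2 D c.1 c.2 + 1) D).2,
        0 ≤ read2 (expand graph n m c (read2 D c.1 c.2 + 1) D).1 c'.1 c'.2 := by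
      rw [he]; exact hmid2
    have htail : ∀ c' ∈ (Q ++ (expand graph n m c (d + 1) D).2)
          ++ (expandAll graph n m (d + 1) (expand graph n m c (d + 1) D).1 F').2,
        0 ≤ read2 (expandAll graph n m (d + 1) (expand graph n m c (d + 1) D).1 F').1
          c'.1 c'.2 := by
      intro c' hc'
      obtain ⟨hpA, hnA⟩ := expandAll_inv graph n m (d + 1) hv F'
        (expand graph n m c (d + 1) D).1
      rcases List.mem_append.mp hc' with hm | hm
      · have h0 := hmid c' (List.mem_append.mpr (Or.inr hm))
        rw [hpA c'.1 c'.2 (by omega)]; exact h0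
      · rw [hnA c' hm]; omega
    show aloop graph n m D (c :: (F' ++ Q)) h = _
    rw [aloop_cons graph n m D c (F' ++ Q) h hmid2']
    rw [aloop_congr graph n m (congrArg Prod.fst he) (by rw [he]) hmid2' hmid2]
    rw [aloop_congr graph n m rfl (List.append_assoc F' Q _) hmid2 hmid]
    rw [ih (Q ++ (expand graph n m c (d + 1) D).2) (expand graph n m c (d + 1) D).1
      d hd hF' hmid htail]
    exact aloop_congr graph n m rfl (by simp [expandAll]) htail h'

theorem aloop_eq_bloop (graph : List (List String)) (n m : Int) :
    ∀ (k : Nat) (D : List (List Int)) (F : List (Int × Int)) (d : Int)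
      (hd : 0 ≤ d), countNeg D ≤ k →
    (∀ c ∈ F, read2 D c.1 c.2 = d) →
    ∀ (h : ∀ c ∈ F, 0 ≤ read2 D c.1 c.2),
    aloop graph n m D F h = bloop graph n m D F d hd := by
  intro k
  induction k with
  | zero =>
    intro D F d hd hk hF h
    cases F with
    | nil => rw [aloop_nil, bloop_nil]
    | cons c F' =>
      have hv : (0 : Int) ≤ d + 1 := by omega
      have hcnt := expandAll_count graph n m (d + 1) hv (c :: F') D
      have hnil : (expandAll graph n m (d + 1) D (c :: F')).2 = [] :=
        List.length_eq_zero_iff.mp (by omega)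
      have h2 : ∀ c' ∈ ((c :: F') ++ ([] : List (Int × Int))), 0 ≤ read2 D c'.1 c'.2 := by
        simpa using h
      have h3 : ∀ c' ∈ ([] : List (Int × Int)) ++ (expandAll graph n m (d + 1) D (c :: F')).2,
          0 ≤ read2 (expandAll graph n m (d + 1) D (c :: F')).1 c'.1 c'.2 := by
        simp [hnil]
      have hs := aloop_split graph n m (c :: F') [] D d hd hF h2 h3
      rw [aloop_congr graph n m rfl (by simp) h h2, hs]
      have hQnil : ([] : List (Int × Int)) ++ (expandAll graph n m (d + 1) D (c :: F')).2
          = ([] : List (Int × Int)) := by simp [hnil]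
      rw [aloop_congr graph n m rfl hQnil h3 (by simp), aloop_nil]
      rw [bloop_cons graph n m D (c :: F') d hd (by simp) hv, hnil, bloop_nil]
  | succ k ih =>
    intro D F d hd hk hF h
    cases F with
    | nil => rw [aloop_nil, bloop_nil]
    | cons c F' =>
      have hv : (0 : Int) ≤ d + 1 := by omega
      have hcnt := expandAll_count graph n m (d + 1) hv (c :: F') D
      obtain ⟨hpA, hnA⟩ := expandAll_inv graph n m (d + 1) hv (c :: F') D
      have h2 : ∀ c' ∈ ((c :: F') ++ ([] : List (Int × Int))), 0 ≤ read2 D c'.1 c'.2 := by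
        simpa using h
      have h4 : ∀ c' ∈ (expandAll graph n m (d + 1) D (c :: F')).2,
          0 ≤ read2 (expandAll graph n m (d + 1) D (c :: F')).1 c'.1 c'.2 := by
        intro c' hc'; rw [hnA c' hc']; omega
      have h3 : ∀ c' ∈ ([] : List (Int × Int)) ++ (expandAll graph n m (d + 1) D (c :: F')).2,
          0 ≤ read2 (expandAll graph n m (d + 1) D (c :: F')).1 c'.1 c'.2 := by
        intro c' hc'
        exact h4 c' (by simpa using hc')
      have hs := aloop_split graph n m (c :: F') [] D d hd hF h2 h3
      rw [aloop_congr graph n m rfl (by simp) h h2, hs]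
      rw [aloop_congr graph n m rfl (List.nil_append _) h3 h4]
      rw [bloop_cons graph n m D (c :: F') d hd (by simp) hv]
      rcases Nat.eq_zero_or_pos (expandAll graph n m (d + 1) D (c :: F')).2.length
        with h0 | h0
      · have hnil : (expandAll graph n m (d + 1) D (c :: F')).2 = [] :=
          List.length_eq_zero_iff.mp h0
        rw [aloop_congr graph n m rfl hnil h4 (by simp [hnil]), aloop_nil, hnil, bloop_nil]
      · have hlt : countNeg (expandAll graph n m (d + 1) D (c :: F')).1 ≤ k := by
          omega
        exact ih (expandAll graph n m (d + 1) D (c :: F')).1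
          (expandAll graph n m (d + 1) D (c :: F')).2 (d + 1) (by omega) hlt hnA h4

-- ---------- layer 2: B's primitives and loop coincide with layer 1's ----------
theorem pyIx_of_nonneg (L : Nat) (i : Int) (h : 0 ≤ i) : pyIx L i = i.toNat := by
  unfold pyIx
  rw [if_neg (by omega : ¬ i < 0)]

theorem lookCell_eq (D : List (List Int)) (x y : Int) (hx : 0 ≤ x) (hy : 0 ≤ y) :
    lookCell D x y = read2 D x y := by
  rw [read2, pyIx_of_nonneg _ _ hx, pyIx_of_nonneg _ _ hy, lookCell]
  simp [List.getD_eq_getElem?_getD]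

theorem putCell_eq (D : List (List Int)) (x y v : Int) (hx : 0 ≤ x) (hy : 0 ≤ y) :
    putCell D x y v = write2 D x y v := by
  rw [write2, pyIx_of_nonneg _ _ hx, pyIx_of_nonneg _ _ hy, putCell]
  by_cases h : x.toNat < D.length
  · rw [List.modify_eq_set_get _ h]
    have : D.getD x.toNat [] = D[x.toNat] := by
      simp [List.getD_eq_getElem?_getD, List.getElem?_eq_getElem h]
    rw [this]
    rfl
  · rw [List.modify_eq_self (Nat.not_lt.mp h), List.set_eq_of_length_le (Nat.not_lt.mp h)]

theorem bstep_eq_nbr (graph : List (List String)) (n m lvl cx cy : Int)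
    (st : List (List Int) × List (Int × Int)) (o : Int × Int) :
    bstep graph n m lvl st (cx + o.1, cy + o.2) = nbr graph n m cx cy lvl st o := by
  by_cases hb : cx + o.1 ≥ 0 ∧ cy + o.2 ≥ 0 ∧ cx + o.1 < n ∧ cy + o.2 < m
      ∧ read2 st.1 (cx + o.1) (cy + o.2) = -1
  · have hlook : lookCell st.1 (cx + o.1) (cy + o.2) = -1 := by
      rw [lookCell_eq _ _ _ hb.1 hb.2.1]; exact hb.2.2.2.2
    by_cases hc : (graph[(cx + o.1).toNat]?.getD [])[(cy + o.2).toNat]?.getD "" = "1"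
    · have e1 : bstep graph n m lvl st (cx + o.1, cy + o.2)
          = (putCell st.1 (cx + o.1) (cy + o.2) lvl, st.2 ++ [(cx + o.1, cy + o.2)]) := by
        simp [bstep, hb.1, hb.2.1, hb.2.2.1, hb.2.2.2.1, hlook, hc]
      have e2 : nbr graph n m cx cy lvl st o
          = (write2 st.1 (cx + o.1) (cy + o.2) lvl, st.2 ++ [(cx + o.1, cy + o.2)]) := by
        simp [nbr, hb, hc]
      rw [e1, e2, putCell_eq _ _ _ _ hb.1 hb.2.1]
    · have e1 : bstep graph n m lvl st (cx + o.1, cy + o.2) = st := by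
        simp [bstep, hc]
      have e2 : nbr graph n m cx cy lvl st o = st := by
        simp [nbr, hb, hc]
      rw [e1, e2]
  · have hbB : ¬ (0 ≤ cx + o.1 ∧ cx + o.1 < n ∧ 0 ≤ cy + o.2 ∧ cy + o.2 < m
        ∧ lookCell st.1 (cx + o.1) (cy + o.2) = -1
        ∧ (graph.getD (cx + o.1).toNat []).getD (cy + o.2).toNat "" = "1") := by
      intro hB
      exact hb ⟨hB.1, hB.2.2.1, hB.2.1, hB.2.2.2.1,
        by rw [← lookCell_eq _ _ _ hB.1 hB.2.2.1]; exact hB.2.2.2.2.1⟩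
    have e1 : bstep graph n m lvl st (cx + o.1, cy + o.2) = st := by
      simp only [bstep]
      rw [if_neg hbB]
    have e2 : nbr graph n m cx cy lvl st o = st := by
      simp [nbr, hb]
    rw [e1, e2]

theorem nbrs_fold_eq (graph : List (List String)) (n m lvl : Int) (c : Int × Int)
    (st : List (List Int) × List (Int × Int)) :
    (nbrsOf c).foldl (bstep graph n m lvl) st
      = (xList.zip yList).foldl (nbr graph n m c.1 c.2 lvl) st := by
  have hz : xList.zip yList = [((0 : Int), (1 : Int)), (-1, 0), (0, -1), (1, 0)] := by
    decide
  have e1 : (c.1, c.2 + 1) = (c.1 + (0 : Int), c.2 + 1) := by simp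
  have e2 : (c.1 - 1, c.2) = (c.1 + (-1 : Int), c.2 + (0 : Int)) := by
    simp [sub_eq_add_neg]
  have e3 : (c.1, c.2 - 1) = (c.1 + (0 : Int), c.2 + (-1 : Int)) := by
    simp [sub_eq_add_neg]
  have e4 : (c.1 + 1, c.2) = (c.1 + (1 : Int), c.2 + (0 : Int)) := by simp
  rw [hz]
  simp only [nbrsOf, List.foldl_cons, List.foldl_nil]
  rw [e1, e2, e3, e4,
    bstep_eq_nbr graph n m lvl c.1 c.2 (o := ((0 : Int), (1 : Int))),
    bstep_eq_nbr graph n m lvl c.1 c.2 (o := ((-1 : Int), (0 : Int))),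
    bstep_eq_nbr graph n m lvl c.1 c.2 (o := ((0 : Int), (-1 : Int))),
    bstep_eq_nbr graph n m lvl c.1 c.2 (o := ((1 : Int), (0 : Int)))]

theorem nbr_fold_acc (graph : List (List String)) (n m cx cy v : Int) :
    ∀ (ds : List (Int × Int)) (D : List (List Int)) (acc : List (Int × Int)),
    ds.foldl (nbr graph n m cx cy v) (D, acc)
      = ((ds.foldl (nbr graph n m cx cy v) (D, [])).1,
          acc ++ (ds.foldl (nbr graph n m cx cy v) (D, [])).2) := by
  intro ds
  induction ds with
  | nil => intro D acc; simp
  | cons d ds ih =>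
    intro D acc
    rw [List.foldl_cons, List.foldl_cons]
    by_cases h1 : cx + d.1 ≥ 0 ∧ cy + d.2 ≥ 0 ∧ cx + d.1 < n ∧ cy + d.2 < m
        ∧ read2 D (cx + d.1) (cy + d.2) = -1
    · by_cases h2 : (graph[(cx + d.1).toNat]?.getD [])[(cy + d.2).toNat]?.getD "" = "1"
      · have hA : nbr graph n m cx cy v (D, acc) d
            = (write2 D (cx + d.1) (cy + d.2) v, acc ++ [(cx + d.1, cy + d.2)]) := by
          simp [nbr, h1, h2]
        have hB : nbr graph n m cx cy v (D, []) d
            = (write2 D (cx + d.1) (cy + d.2) v, [] ++ [(cx + d.1, cy + d.2)]) := by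
          simp [nbr, h1, h2]
        rw [hA, hB, ih (write2 D (cx + d.1) (cy + d.2) v) (acc ++ [(cx + d.1, cy + d.2)]),
          ih (write2 D (cx + d.1) (cy + d.2) v) ([] ++ [(cx + d.1, cy + d.2)])]
        simp
      · have hA : nbr graph n m cx cy v (D, acc) d = (D, acc) := by simp [nbr, h1, h2]
        have hB : nbr graph n m cx cy v (D, []) d = (D, []) := by simp [nbr, h1, h2]
        rw [hA, hB]
        exact ih D acc
    · have hA : nbr graph n m cx cy v (D, acc) d = (D, acc) := by simp [nbr, h1]
      have hB : nbr graph n m cx cy v (D, []) d = (D, []) := by simp [nbr, h1]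
      rw [hA, hB]
      exact ih D acc

theorem stepLevel_eq_expandAll (graph : List (List String)) (n m v : Int) :
    ∀ (F : List (Int × Int)) (D : List (List Int)) (acc : List (Int × Int)),
    F.foldl (fun st c => (nbrsOf c).foldl (bstep graph n m v) st) (D, acc)
      = ((expandAll graph n m v D F).1, acc ++ (expandAll graph n m v D F).2) := by
  intro F
  induction F with
  | nil => intro D acc; simp [expandAll]
  | cons c F ih =>
    intro F0 acc
    rw [List.foldl_cons, nbrs_fold_eq]
    have hstep : (xList.zip yList).foldl (nbr graph n m c.1 c.2 v) (F0, acc)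
        = ((expand graph n m c v F0).1, acc ++ (expand graph n m c v F0).2) := by
      simpa [expand] using nbr_fold_acc graph n m c.1 c.2 v (xList.zip yList) F0 acc
    rw [hstep, ih (expand graph n m c v F0).1 (acc ++ (expand graph n m c v F0).2)]
    show _ = ((expandAll graph n m v F0 (c :: F)).1, acc ++ (expandAll graph n m v F0 (c :: F)).2)
    simp [expandAll, List.append_assoc]

theorem blvl_nil (graph : List (List String)) (n m : Int) (D : List (List Int))
    (level : Int) (hd : 0 ≤ level) :
    blvl graph n m D [] level hd = D := by
  rw [blvl.eq_def]; simp

theorem blvl_cons (graph : List (List String)) (n m : Int) (D : List (List Int))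
    (F : List (Int × Int)) (level : Int) (hd : 0 ≤ level) (hF : F ≠ [])
    (hd₂ : 0 ≤ level + 1) :
    blvl graph n m D F level hd
      = blvl graph n m (stepLevel graph n m (level + 1) D F).1
          (stepLevel graph n m (level + 1) D F).2 (level + 1) hd₂ := by
  rw [blvl.eq_def]; simp [hF]

theorem blvl_eq_bloop (graph : List (List String)) (n m : Int) :
    ∀ (k : Nat) (D : List (List Int)) (F : List (Int × Int)) (level : Int)
      (hd : 0 ≤ level), countNeg D ≤ k →
    blvl graph n m D F level hd = bloop graph n m D F level hd := by
  intro k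
  induction k with
  | zero =>
    intro D F level hd hk
    cases F with
    | nil => rw [blvl_nil, bloop_nil]
    | cons c F' =>
      have hv : (0 : Int) ≤ level + 1 := by omega
      have hse := stepLevel_eq_expandAll graph n m (level + 1) (c :: F') D []
      have hs1 : (stepLevel graph n m (level + 1) D (c :: F')).1
          = (expandAll graph n m (level + 1) D (c :: F')).1 := by
        show (List.foldl _ (D, []) (c :: F')).1 = _
        rw [hse]
      have hs2 : (stepLevel graph n m (level + 1) D (c :: F')).2
          = (expandAll graph n m (level + 1) D (c :: F')).2 := by
        show (List.foldl _ (D, []) (c :: F')).2 = _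
        rw [hse]; simp
      have hcnt := expandAll_count graph n m (level + 1) hv (c :: F') D
      have hnil : (expandAll graph n m (level + 1) D (c :: F')).2 = [] :=
        List.length_eq_zero_iff.mp (by omega)
      rw [blvl_cons graph n m D (c :: F') level hd (by simp) hv,
        bloop_cons graph n m D (c :: F') level hd (by simp) hv]
      rw [hs1, hs2, hnil, blvl_nil, bloop_nil]
  | succ k ih =>
    intro D F level hd hk
    cases F with
    | nil => rw [blvl_nil, bloop_nil]
    | cons c F' =>
      have hv : (0 : Int) ≤ level + 1 := by omega
      have hse := stepLevel_eq_expandAll graph n m (level + 1) (c :: F') D []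
      have hs1 : (stepLevel graph n m (level + 1) D (c :: F')).1
          = (expandAll graph n m (level + 1) D (c :: F')).1 := by
        show (List.foldl _ (D, []) (c :: F')).1 = _
        rw [hse]
      have hs2 : (stepLevel graph n m (level + 1) D (c :: F')).2
          = (expandAll graph n m (level + 1) D (c :: F')).2 := by
        show (List.foldl _ (D, []) (c :: F')).2 = _
        rw [hse]; simp
      have hcnt := expandAll_count graph n m (level + 1) hv (c :: F') D
      rw [blvl_cons graph n m D (c :: F') level hd (by simp) hv,
        bloop_cons graph n m D (c :: F') level hd (by simp) hv]
      rw [hs1, hs2]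
      rcases Nat.eq_zero_or_pos (expandAll graph n m (level + 1) D (c :: F')).2.length
        with h0 | h0
      · have hnil : (expandAll graph n m (level + 1) D (c :: F')).2 = [] :=
          List.length_eq_zero_iff.mp h0
        rw [hnil, blvl_nil, bloop_nil]
      · have hlt : countNeg (expandAll graph n m (level + 1) D (c :: F')).1 ≤ k := by
          omega
        exact ih (expandAll graph n m (level + 1) D (c :: F')).1
          (expandAll graph n m (level + 1) D (c :: F')).2 (level + 1) hv hlt

-- the two initial grids coincide (goal inside Python's wrap range)
theorem initGrid_eq (n m gx gy : Int) (h1 : 0 < n) (h2 : 0 < m)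
    (h3 : -n ≤ gx) (h4 : gx < n) (h5 : -m ≤ gy) (h6 : gy < m) :
    initGrid n m gx gy
      = write2 (List.replicate n.toNat (List.replicate m.toNat (-1))) gx gy 0 := by
  have hrx : pyIx (List.replicate n.toNat (List.replicate m.toNat (-1 : Int))).length gx
      = (if gx < 0 then n + gx else gx).toNat := by
    simp only [pyIx, List.length_replicate]
    have hn : ((n.toNat : Nat) : Int) = n := by omega
    rw [hn]
  have hr_lt : (if gx < 0 then n + gx else gx).toNat < n.toNat := by
    split <;> omega
  have hrow : (List.replicate n.toNat (List.replicate m.toNat (-1 : Int))).getD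
      ((if gx < 0 then n + gx else gx).toNat) []
      = List.replicate m.toNat (-1) := by
    rw [List.getD_eq_getElem?_getD, List.getElem?_replicate, if_pos hr_lt]
    rfl
  have hcy : pyIx (List.replicate m.toNat (-1 : Int)).length gy
      = (if gy < 0 then m + gy else gy).toNat := by
    simp only [pyIx, List.length_replicate]
    have hm : ((m.toNat : Nat) : Int) = m := by omega
    rw [hm]
  rw [write2, hrx, hrow, hcy, initGrid,
    List.modify_eq_set_get _ (by rw [List.length_replicate]; exact hr_lt)]
  congr 1
  simp [List.get_eq_getElem, List.getElem_replicate]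

theorem init_read (n m gx gy : Int) (h1 : 0 < n) (h2 : 0 < m)
    (h3 : -n ≤ gx) (h4 : gx < n) (h5 : -m ≤ gy) (h6 : gy < m) :
    read2 (write2 (List.replicate n.toNat (List.replicate m.toNat (-1))) gx gy 0) gx gy
      = 0 := by
  apply read2_write2_self
  have hxr : pyIx (List.replicate n.toNat (List.replicate m.toNat (-1 : Int))).length gx
      < n.toNat := by
    simp only [pyIx, List.length_replicate]
    split <;> omega
  have hrow : (List.replicate n.toNat (List.replicate m.toNat (-1 : Int))).getD
      (pyIx (List.replicate n.toNat (List.replicate m.toNat (-1 : Int))).length gx) []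
      = List.replicate m.toNat (-1) := by
    rw [List.getD_eq_getElem?_getD, List.getElem?_replicate, if_pos hxr]
    rfl
  rw [read2, hrow]
  have hyr : pyIx (List.replicate m.toNat (-1 : Int)).length gy < m.toNat := by
    simp only [pyIx, List.length_replicate]
    split <;> omega
  rw [List.getD_eq_getElem?_getD, List.getElem?_replicate, if_pos hyr]
  rfl

-- ===== VERDICT (by name: the statement is the Claim_ definition above) =====
theorem bfs_spec : Claim_equal_bfs := by
  intro graph n m goal _ hpre
  obtain ⟨h1, h2, h3, h4, h5, h6, -⟩ := hpre
  show bfs graph n m goal = bfs_alt graph n m goal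
  unfold bfs bfs_alt
  have hr := init_read n m goal.1 goal.2 h1 h2 h3 h4 h5 h6
  have hguard : ∀ c ∈ [goal],
      0 ≤ read2 (write2 (List.replicate n.toNat (List.replicate m.toNat (-1)))
        goal.1 goal.2 0) c.1 c.2 := by
    intro c hc; simp at hc; subst hc; rw [hr]
  rw [dif_pos hguard]
  rw [aloop_eq_bloop graph n m
    (countNeg (write2 (List.replicate n.toNat (List.replicate m.toNat (-1))) goal.1 goal.2 0))
    _ [goal] 0 (by omega) le_rfl
    (by intro c hc; simp at hc; subst hc; exact hr) hguard]
  rw [initGrid_eq n m goal.1 goal.2 h1 h2 h3 h4 h5 h6]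
  exact (blvl_eq_bloop graph n m
    (countNeg (write2 (List.replicate n.toNat (List.replicate m.toNat (-1))) goal.1 goal.2 0))
    _ [goal] 0 (le_refl 0) le_rfl).symm
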